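-- pv_equiv track=rewrite | github.com/ludia8888/SPICE-Harvester | backend/shared/services/pipeline/pipeline_relationship_inference.py | _is_name_only_match
-- ===== SOURCE A (Python) =====
-- from typing import Any, Dict, Iterable, List, Optional, Set, Tuple
--
-- def _is_name_only_match(reasons: List[str]) -> bool:
--     """
--     Enterprise Enhancement (2026-01):
--     Detect if FK candidate is based purely on column name matching.
--     """
--     if not reasons:
--         return True  # No reasons means likely name-based
--
--     name_related_keywords = {"name", "match", "similar", "suffix", "prefix", "pattern"}
--     value_related_keywords = {"overlap", "containment", "value", "cardinality", "unique", "distinct"}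
--
--     has_name_reason = False
--     has_value_reason = False
--
--     for reason in reasons:
--         reason_lower = reason.lower()
--         if any(kw in reason_lower for kw in name_related_keywords):
--             has_name_reason = True
--         if any(kw in reason_lower for kw in value_related_keywords):
--             has_value_reason = True
--
--     # If only name-based reasons and no value-based reasons, it's name-only
--     return has_name_reason and not has_value_reason
-- ===== SOURCE B (Python) =====
-- from typing import List
--
-- def _is_name_only_match(reasons: List[str]) -> bool:
--     if not reasons:
--         return True  # No reasons means likely name-based
--
--     name_related_keywords = ("name", "match", "similar", "suffix", "prefix", "pattern")
--     value_related_keywords = ("overlap", "containment", "value", "cardinality", "unique", "distinct")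
--
--     # Flatten once: keywords contain no spaces, so a keyword occurs in the
--     # space-joined text iff it occurs in some individual reason.
--     text = " ".join(reasons).lower()
--     has_name = any(kw in text for kw in name_related_keywords)
--     has_value = any(kw in text for kw in value_related_keywords)
--     return has_name and not has_value
-- ===== Notes on version B (the rewrite author's own statement) =====
-- stated objective: simpler
-- what changed: Replaces A's per-reason loop maintaining two mutable flags (with a nested keyword scan per reason) by joining all reasons into one lowercased text with a space separator and doing two flat keyword scans over that single string; exact because no keyword contains a space, so no match can cross a join boundary.
import Mathlib
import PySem

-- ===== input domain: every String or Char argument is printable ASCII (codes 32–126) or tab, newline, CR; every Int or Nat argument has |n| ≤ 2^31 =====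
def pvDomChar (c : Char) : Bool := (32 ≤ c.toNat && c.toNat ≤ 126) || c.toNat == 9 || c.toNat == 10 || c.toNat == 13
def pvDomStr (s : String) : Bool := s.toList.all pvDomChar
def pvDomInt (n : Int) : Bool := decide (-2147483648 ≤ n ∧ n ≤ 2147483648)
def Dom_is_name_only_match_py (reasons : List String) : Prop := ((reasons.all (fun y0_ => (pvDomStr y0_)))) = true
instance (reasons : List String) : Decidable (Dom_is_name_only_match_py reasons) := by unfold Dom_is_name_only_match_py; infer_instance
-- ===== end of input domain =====

-- B replaces A's per-reason loop with two flags by one space-joined lowercased text scanned once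
-- per keyword set (exact: no keyword contains a space); objective: simpler.

-- ===== PORT A =====
def pvNameKws : List String := ["name", "match", "similar", "suffix", "prefix", "pattern"]
def pvValueKws : List String := ["overlap", "containment", "value", "cardinality", "unique", "distinct"]

def is_name_only_match_py (reasons : List String) : Bool :=
  if reasons = [] then true
  else
    let st := reasons.foldl (fun (st : Bool × Bool) reason =>
      let reason_lower := PySem.Str.lower reason
      ((if pvNameKws.any (fun kw => PySem.Str.isIn kw reason_lower) then true else st.1),
       (if pvValueKws.any (fun kw => PySem.Str.isIn kw reason_lower) then true else st.2)))
      (false, false)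
    st.1 && !st.2

-- ===== PORT B =====
def is_name_only_match_py_alt (reasons : List String) : Bool :=
  if reasons = [] then true
  else
    let text := PySem.Str.lower (PySem.Str.join " " reasons)
    (pvNameKws.any (fun kw => PySem.Str.isIn kw text)) &&
      !(pvValueKws.any (fun kw => PySem.Str.isIn kw text))

-- ===== PRECONDITION & SPEC =====
def Spec_is_name_only_match_py (reasons : List String) (out : Bool) : Prop := out = is_name_only_match_py_alt reasons
instance (reasons : List String) (out : Bool) : Decidable (Spec_is_name_only_match_py reasons out) := by unfold Spec_is_name_only_match_py; infer_instance

-- ===== CLAIM (what is proved, stated in full; the proofs are below) =====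
def Claim_equal_is_name_only_match_py : Prop := ∀ (reasons : List String), Dom_is_name_only_match_py reasons → Spec_is_name_only_match_py reasons (is_name_only_match_py reasons)

-- ===== LEMMAS AND PROOFS =====

-- A list not containing c that is a prefix of x ++ c :: y is a prefix of x.
theorem pref_split {c : Char} : ∀ (l x : List Char) (y : List Char), c ∉ l → l <+: x ++ c :: y → l <+: x := by
  intro l
  induction l with
  | nil => intro x y _ _; exact List.nil_prefix
  | cons a l ih =>
    intro x y hc h
    cases x with
    | nil =>
      rcases List.cons_prefix_cons.mp (by simpa using h) with ⟨h1, _⟩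
      simp at hc
      exact absurd h1.symm hc.1
    | cons b x' =>
      rcases List.cons_prefix_cons.mp h with ⟨hab, h2⟩
      simp at hc
      exact List.cons_prefix_cons.mpr ⟨hab, ih x' y hc.2 h2⟩

-- An infix not containing c cannot straddle the separator c.
theorem infix_split {c : Char} (l : List Char) (hc : c ∉ l) :
    ∀ x y : List Char, (l <:+: x ++ c :: y ↔ l <:+: x ∨ l <:+: y) := by
  intro x
  induction x with
  | nil =>
    intro y
    simp only [List.nil_append]
    rw [List.infix_cons_iff]
    constructor
    · rintro (hp | hi)
      · cases l with
        | nil => exact Or.inl (List.nil_infix)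
        | cons a l' =>
          rcases List.cons_prefix_cons.mp hp with ⟨h1, _⟩
          simp at hc
          exact absurd h1.symm hc.1
      · exact Or.inr hi
    · rintro (h | h)
      · rw [List.infix_nil] at h; subst h; exact Or.inl List.nil_prefix
      · exact Or.inr h
  | cons a x' ih =>
    intro y
    constructor
    · intro h
      rw [List.cons_append, List.infix_cons_iff] at h
      rcases h with hp | hi
      · exact Or.inl (pref_split l (a :: x') y hc (by simpa using hp)).isInfix
      · rcases (ih y).mp hi with h | h
        · exact Or.inl (h.trans (List.suffix_cons a x').isInfix)
        · exact Or.inr h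
    · rintro (h | h)
      · exact h.trans (List.prefix_append _ _).isInfix
      · rw [List.cons_append]
        exact ((ih y).mpr (Or.inr h)).trans (List.suffix_cons a _).isInfix

-- A space-free nonempty keyword occurs in the space-joined text iff it occurs in some part.
theorem isIn_join_space (kw : List Char) (hsp : ' ' ∉ kw) (hne : kw ≠ []) :
    ∀ parts : List (List Char),
      PySem.Chars.isIn kw (PySem.Chars.join [' '] parts) = parts.any (fun p => PySem.Chars.isIn kw p) := by
  intro parts
  induction parts with
  | nil =>
    rw [PySem.Chars.join_nil]
    simp [PySem.Chars.isIn_eq_false_iff, List.infix_nil, hne]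
  | cons p ps ih =>
    cases ps with
    | nil => simp [PySem.Chars.join_singleton]
    | cons q qs =>
      rw [PySem.Chars.join_cons_cons]
      have hrw : p ++ [' '] ++ PySem.Chars.join [' '] (q :: qs) = p ++ ' ' :: PySem.Chars.join [' '] (q :: qs) := by simp
      rw [hrw, Bool.eq_iff_iff, PySem.Chars.isIn_iff_infix, infix_split kw hsp]
      rw [List.any_cons, ← ih]
      simp [PySem.Chars.isIn_iff_infix]

-- lower commutes with the space-join (the separator is lowercase-invariant).
theorem lower_join_space : ∀ ps : List (List Char),
    PySem.Chars.lower (PySem.Chars.join [' '] ps) = PySem.Chars.join [' '] (ps.map PySem.Chars.lower) := by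
  intro ps
  induction ps with
  | nil => simp [PySem.Chars.join_nil, PySem.Chars.lower]
  | cons p qs ih =>
    cases qs with
    | nil => simp [PySem.Chars.join_singleton]
    | cons q rs =>
      rw [PySem.Chars.join_cons_cons, List.map_cons, List.map_cons, PySem.Chars.join_cons_cons,
        ← List.map_cons (f := PySem.Chars.lower) (a := q) (l := rs), ← ih]
      simp [PySem.Chars.lower]
      decide

-- The Str-level fact the B port relies on, per keyword.
theorem isIn_joined (kw : String) (hsp : ' ' ∉ kw.toList) (hne : kw.toList ≠ []) (L : List String) :
    PySem.Str.isIn kw (PySem.Str.lower (PySem.Str.join " " L)) =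
      L.any (fun r => PySem.Str.isIn kw (PySem.Str.lower r)) := by
  simp only [PySem.Str.isIn_eq, PySem.Str.toList_lower, PySem.Str.toList_join]
  have hsep : " ".toList = [' '] := rfl
  rw [hsep, lower_join_space, isIn_join_space kw.toList hsp hne]
  simp [List.any_map, Function.comp_def]

-- A's loop computes "some reason hits the name set" / "some reason hits the value set".
theorem foldA (L : List String) (f g : String → Bool) (b1 b2 : Bool) :
    L.foldl (fun (st : Bool × Bool) r => ((if f r then true else st.1), (if g r then true else st.2)))
      (b1, b2) = (b1 || L.any f, b2 || L.any g) := by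
  induction L generalizing b1 b2 with
  | nil => simp
  | cons a L ih =>
    rw [List.foldl_cons, ih, List.any_cons, List.any_cons]
    cases hf : f a <;> cases hg : g a <;> simp

-- any distributes over a pointwise disjunction.
theorem any_or (L : List String) (f g : String → Bool) :
    L.any (fun r => f r || g r) = (L.any f || L.any g) := by
  induction L with
  | nil => simp
  | cons a L ih =>
    rw [List.any_cons, ih, List.any_cons, List.any_cons]
    cases f a <;> cases g a <;> simp

-- ===== VERDICT (by name: the statement is the Claim_ definition above) =====
theorem is_name_only_match_py_spec : Claim_equal_is_name_only_match_py := by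
  intro reasons _
  unfold Spec_is_name_only_match_py is_name_only_match_py is_name_only_match_py_alt
  by_cases h : reasons = []
  · simp [h]
  · simp only [if_neg h]
    rw [foldA reasons
      (fun r => pvNameKws.any (fun kw => PySem.Str.isIn kw (PySem.Str.lower r)))
      (fun r => pvValueKws.any (fun kw => PySem.Str.isIn kw (PySem.Str.lower r))) false false]
    simp only [pvNameKws, pvValueKws, List.any_cons, List.any_nil, Bool.or_false, Bool.false_or]
    rw [isIn_joined "name" (by decide) (by decide),
        isIn_joined "match" (by decide) (by decide),
        isIn_joined "similar" (by decide) (by decide),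
        isIn_joined "suffix" (by decide) (by decide),
        isIn_joined "prefix" (by decide) (by decide),
        isIn_joined "pattern" (by decide) (by decide),
        isIn_joined "overlap" (by decide) (by decide),
        isIn_joined "containment" (by decide) (by decide),
        isIn_joined "value" (by decide) (by decide),
        isIn_joined "cardinality" (by decide) (by decide),
        isIn_joined "unique" (by decide) (by decide),
        isIn_joined "distinct" (by decide) (by decide)]
    simp only [any_or]
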